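-- pv_equiv track=rewrite | github.com/mik5plays/muic-archive | intro-to-programming/Assignment 6/t2048_4x4.py | doKeyRight
-- ===== SOURCE A (Python) =====
-- from typing import List, Tuple
--
-- Board = List[List[str]]
--
-- def doKeyRight(board: Board) -> Tuple[bool, Board]:
--     # Step one: Move right.
--     newBoard: Board = []
--     for row in board:
--         temp = [x for x in row if x != " "]
--         temp = temp[::-1]
--         rowTemp = [" ", " ", " ", " "]
--         for i in range(1, 5):
--             if i <= len(temp):
--                 rowTemp[-i] = temp[i - 1]
--         newBoard.append(rowTemp)
--
--     # Step two: Merge adjacent tiles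
--     for row in newBoard:
--         count = -1
--         while count > -4:
--             if row[count] == row[count - 1] and row[count] != " ":
--                 row[count] = " "
--                 row[count - 1] = str(int(row[count - 1]) * 2)
--                 count -= 2
--             else:
--                 count -= 1
--
--     # Step three: Step one again
--     for j in range(len(newBoard)):
--         temp = [x for x in newBoard[j] if x != " "]
--         temp = temp[::-1]
--         rowTemp = [" ", " ", " ", " "]
--         for i in range(1, 5):
--             if i <= len(temp):
--                 rowTemp[-i] = temp[i - 1]
--         newBoard[j] = rowTemp
--
--     # Step four, check if board has changed
--     boardChanged: bool = False
--     for i in range(len(newBoard)):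
--         if newBoard[i] != board[i]:
--             boardChanged = True
--
--     return boardChanged, newBoard
-- ===== SOURCE B (Python) =====
-- def _shift_merge_right(row):
--     tiles = [x for x in row if x != " "][-4:]
--     out = []
--     i = len(tiles) - 1
--     while i >= 0:
--         if i > 0 and tiles[i] == tiles[i - 1]:
--             out.append(str(int(tiles[i]) * 2))
--             i -= 2
--         else:
--             out.append(tiles[i])
--             i -= 1
--     out.reverse()
--     return [" "] * (4 - len(out)) + out
--
--
-- def doKeyRight(board):
--     newBoard = [_shift_merge_right(row) for row in board]
--     return any(n != r for n, r in zip(newBoard, board)), newBoard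
-- ===== Notes on version B (the rewrite author's own statement) =====
-- stated objective: simpler
-- what changed: Replaces A's four board passes (compact into a padded row, in-place sentinel-space merge loop over negative indices, a second compact pass, and an index-based change scan) with one per-row right-to-left greedy walk over the non-space tiles that emits the merged row directly, plus a zip comparison for the changed flag.
import Mathlib
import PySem

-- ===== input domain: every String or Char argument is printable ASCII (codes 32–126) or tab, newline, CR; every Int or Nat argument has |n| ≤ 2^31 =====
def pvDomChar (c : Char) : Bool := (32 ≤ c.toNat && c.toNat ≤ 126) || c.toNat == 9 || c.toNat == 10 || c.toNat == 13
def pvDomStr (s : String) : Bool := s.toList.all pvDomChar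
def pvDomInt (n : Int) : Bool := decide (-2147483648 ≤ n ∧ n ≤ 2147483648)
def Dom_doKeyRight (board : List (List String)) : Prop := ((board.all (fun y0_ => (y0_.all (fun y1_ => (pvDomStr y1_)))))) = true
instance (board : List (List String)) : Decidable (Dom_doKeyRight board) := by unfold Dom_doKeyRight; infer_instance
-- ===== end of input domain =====

-- B replaces A's four board passes (compact, in-place sentinel-space merge, re-compact, index scan)
-- with one right-to-left greedy merge walk per row plus a zip comparison; same cost, simpler shape.

-- ===== PORT A =====
-- steps one and three of A are the same compacting code; it is kept as one helper used twice
def pvMoveRow (row : List String) : List String :=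
  let temp := row.foldl (fun acc x => if x ≠ " " then acc ++ [x] else acc) []  -- [x for x in row if x != " "]
  let temp := temp.reverse                     -- temp[::-1]  (PySem.List.slice?_none_none_neg_one)
  (PySem.List.pyRange 1 5 1).foldl
    (fun rowTemp i =>
      if i ≤ PySem.List.len temp then
        PySem.List.pySetD rowTemp (-i) (PySem.List.pyGetD temp (i - 1) " ")
      else rowTemp)
    [" ", " ", " ", " "]

-- A's 'while count > -4' merge loop; int(row[count-1]) is ofStr? with getD 0 (none = the ValueError Pre_ excludes)
def pvMergeRow (row : List String) (count : Int) : List String :=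
  if count > -4 then
    if PySem.List.pyGetD row count " " = PySem.List.pyGetD row (count - 1) " " ∧
       PySem.List.pyGetD row count " " ≠ " " then
      let row1 := PySem.List.pySetD row count " "
      let row2 := PySem.List.pySetD row1 (count - 1)
        (PySem.Int.toStr ((PySem.Int.ofStr? (PySem.List.pyGetD row1 (count - 1) " ")).getD 0 * 2))
      pvMergeRow row2 (count - 2)
    else
      pvMergeRow row (count - 1)
  else row
termination_by (count + 4).toNat
decreasing_by all_goals omega

def doKeyRight (board : List (List String)) : Bool × List (List String) :=
  let newBoard := board.foldl (fun acc row => acc ++ [pvMoveRow row]) []     -- step one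
  let newBoard := newBoard.map (fun row => pvMergeRow row (-1))             -- step two (in-place per row)
  let newBoard := newBoard.map (fun row => pvMoveRow row)                   -- step three
  let boardChanged := (PySem.List.pyRange 0 (PySem.List.len newBoard) 1).foldl  -- step four
    (fun b i => if PySem.List.pyGetD newBoard i [] ≠ PySem.List.pyGetD board i [] then true else b) false
  (boardChanged, newBoard)

-- ===== PORT B =====
-- the while-loop of Source B: walk the tiles from the right, emitting merged/plain tiles (in reverse order)
def pvMergeWalk (tiles : List String) (i : Int) (out : List String) : List String :=
  if i ≥ 0 then
    if i > 0 ∧ PySem.List.pyGetD tiles i " " = PySem.List.pyGetD tiles (i - 1) " " then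
      pvMergeWalk tiles (i - 2)
        (out ++ [PySem.Int.toStr ((PySem.Int.ofStr? (PySem.List.pyGetD tiles i " ")).getD 0 * 2)])
    else
      pvMergeWalk tiles (i - 1) (out ++ [PySem.List.pyGetD tiles i " "])
  else out
termination_by (i + 1).toNat
decreasing_by all_goals omega

def pvShiftMergeRight (row : List String) : List String :=
  let tiles := PySem.List.slice (row.filter (fun x => x ≠ " ")) (some (-4)) none  -- [... ][-4:]
  let out := (pvMergeWalk tiles (PySem.List.len tiles - 1) []).reverse
  List.replicate (4 - out.length) " " ++ out

def doKeyRight_alt (board : List (List String)) : Bool × List (List String) :=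
  let newBoard := board.map pvShiftMergeRight
  ((newBoard.zip board).any (fun p => decide (p.1 ≠ p.2)), newBoard)

-- ===== PRECONDITION & SPEC =====
-- Pre_ excludes exactly the boards on which the Python A raises ValueError: some row's last four
-- non-space tiles contain two adjacent equal entries that int() cannot parse (B raises there too).
def Pre_doKeyRight (board : List (List String)) : Prop :=
  board.all (fun row =>
    let u := (row.filter (fun x => x ≠ " ")).drop ((row.filter (fun x => x ≠ " ")).length - 4)
    (u.zip u.tail).all (fun p => !(p.1 == p.2 && (PySem.Int.ofStr? p.1).isNone))) = true
instance (board : List (List String)) : Decidable (Pre_doKeyRight board) := by unfold Pre_doKeyRight; infer_instance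
def pvWitness_doKeyRight : List (List String) := [["2", "2", " ", "4"], [" ", " ", " ", " "]]

def Spec_doKeyRight (board : List (List String)) (out : Bool × List (List String)) : Prop := out = doKeyRight_alt board
instance (board : List (List String)) (out : Bool × List (List String)) : Decidable (Spec_doKeyRight board out) := by unfold Spec_doKeyRight; infer_instance

-- ===== CLAIM (what is proved, stated in full; the proofs are below) =====
def Claim_equal_doKeyRight : Prop := ∀ (board : List (List String)), Dom_doKeyRight board → Pre_doKeyRight board → Spec_doKeyRight board (doKeyRight board)

-- ===== LEMMAS AND PROOFS =====

def pvPad4 (xs : List String) : List String := List.replicate (4 - xs.length) " " ++ xs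

set_option maxHeartbeats 1000000 in
theorem pvDigitChar_ne_space (m : Nat) : Nat.digitChar m ≠ ' ' := by
  rcases lt_or_ge m 16 with h | h
  · interval_cases m <;> decide
  · have e : Nat.digitChar m = '*' := by
      unfold Nat.digitChar
      rw [if_neg (by omega), if_neg (by omega), if_neg (by omega), if_neg (by omega),
          if_neg (by omega), if_neg (by omega), if_neg (by omega), if_neg (by omega),
          if_neg (by omega), if_neg (by omega), if_neg (by omega), if_neg (by omega),
          if_neg (by omega), if_neg (by omega), if_neg (by omega), if_neg (by omega)]
    rw [e]; decide

theorem pvToDigitsCore_no_space (f : Nat) : ∀ (n : Nat) (ds : List Char), ' ' ∉ ds →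
    ' ' ∉ Nat.toDigitsCore 10 f n ds := by
  induction f with
  | zero => intro n ds h; simpa [Nat.toDigitsCore]
  | succ f ih =>
    intro n ds h
    simp only [Nat.toDigitsCore]
    split
    · intro hmem
      rcases List.mem_cons.mp hmem with h1 | h1
      · exact pvDigitChar_ne_space _ h1.symm
      · exact h h1
    · exact ih _ _ (by
        intro hmem
        rcases List.mem_cons.mp hmem with h1 | h1
        · exact pvDigitChar_ne_space _ h1.symm
        · exact h h1)

theorem pvToStr_ne_space (n : Int) : PySem.Int.toStr n ≠ " " := by
  intro h
  have h2 : PySem.Int.toChars n = [' '] := by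
    rw [← PySem.Int.toList_toStr, h]; rfl
  unfold PySem.Int.toChars at h2
  split at h2
  · have : ' ' ∈ ('-' :: Nat.toDigits 10 n.natAbs) := by rw [h2]; simp
    rcases List.mem_cons.mp this with h1 | h1
    · exact absurd h1.symm (by decide)
    · exact pvToDigitsCore_no_space _ _ _ (by simp) h1
  · have h3 : ' ' ∈ Nat.toDigits 10 n.toNat := by rw [h2]; simp
    exact pvToDigitsCore_no_space _ _ _ (by simp) h3


theorem pvMoveRow_eq (row : List String) :
    pvMoveRow row = pvPad4 (((row.filter (fun x => x ≠ " ")).reverse.take 4).reverse) := by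
  unfold pvMoveRow
  rw [PySem.List.foldl_append_ite_eq_filter]
  simp only [List.nil_append]
  generalize (row.filter (fun x => x ≠ " ")).reverse = r
  match r with
  | [] => rfl
  | [a] => rfl
  | [a,b] => rfl
  | [a,b,c] => rfl
  | a::b::c::d::rest =>
    rw [show PySem.List.pyRange 1 5 1 = [1,2,3,4] from by decide]
    simp only [List.foldl_cons, List.foldl_nil, PySem.List.len_eq, List.length_cons]
    rw [if_pos (by push_cast; omega), if_pos (by push_cast; omega),
        if_pos (by push_cast; omega), if_pos (by push_cast; omega)]
    norm_num [PySem.List.pyGetD_ofNat']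
    rfl


theorem pvMerge_eq (u : List String) (h4 : u.length ≤ 4) (hs : ∀ x ∈ u, x ≠ " ") :
    pvMoveRow (pvMergeRow (pvPad4 u) (-1)) =
    pvPad4 ((pvMergeWalk u (PySem.List.len u - 1) []).reverse) := by
  rw [pvMoveRow_eq]
  match u, h4 with
  | [], _ =>
    simp [pvMergeRow, pvMergeWalk, pvPad4, PySem.List.pyGetD, PySem.List.pyGet?,
      PySem.List.pyIdx?, PySem.List.pySetD, PySem.List.pySet?, PySem.List.len_eq, List.filter]
  | [a], _ =>
    have ha := hs a (by simp)
    simp [pvMergeRow, pvMergeWalk, pvPad4, PySem.List.pyGetD, PySem.List.pyGet?,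
      PySem.List.pyIdx?, PySem.List.pySetD, PySem.List.pySet?, PySem.List.len_eq,
      ha, List.filter]
  | [a, b], _ =>
    have ha := hs a (by simp); have hb := hs b (by simp)
    by_cases h : b = a
    · subst h
      simp [pvMergeRow, pvMergeWalk, pvPad4, PySem.List.pyGetD, PySem.List.pyGet?,
        PySem.List.pyIdx?, PySem.List.pySetD, PySem.List.pySet?, PySem.List.len_eq,
        ha, pvToStr_ne_space, List.filter]
    · simp [pvMergeRow, pvMergeWalk, pvPad4, PySem.List.pyGetD, PySem.List.pyGet?,
        PySem.List.pyIdx?, PySem.List.pySetD, PySem.List.pySet?, PySem.List.len_eq,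
        ha, hb, h, List.filter]
  | [a, b, c], _ =>
    have ha := hs a (by simp); have hb := hs b (by simp); have hc := hs c (by simp)
    by_cases h1 : c = b
    · subst h1
      simp [pvMergeRow, pvMergeWalk, pvPad4, PySem.List.pyGetD, PySem.List.pyGet?,
        PySem.List.pyIdx?, PySem.List.pySetD, PySem.List.pySet?, PySem.List.len_eq,
        ha, hc, pvToStr_ne_space, List.filter]
    · by_cases h2 : b = a
      · subst h2
        simp [pvMergeRow, pvMergeWalk, pvPad4, PySem.List.pyGetD, PySem.List.pyGet?,
          PySem.List.pyIdx?, PySem.List.pySetD, PySem.List.pySet?, PySem.List.len_eq,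
          ha, hb, hc, h1, pvToStr_ne_space, List.filter]
      · simp [pvMergeRow, pvMergeWalk, pvPad4, PySem.List.pyGetD, PySem.List.pyGet?,
          PySem.List.pyIdx?, PySem.List.pySetD, PySem.List.pySet?, PySem.List.len_eq,
          ha, hb, hc, h1, h2, List.filter]
  | [a, b, c, d], _ =>
    have ha := hs a (by simp); have hb := hs b (by simp)
    have hc := hs c (by simp); have hd := hs d (by simp)
    by_cases h1 : d = c
    · subst h1
      by_cases h2 : b = a
      · subst h2
        simp [pvMergeRow, pvMergeWalk, pvPad4, PySem.List.pyGetD, PySem.List.pyGet?,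
          PySem.List.pyIdx?, PySem.List.pySetD, PySem.List.pySet?, PySem.List.len_eq,
          ha, hb, hd, pvToStr_ne_space, List.filter]
      · simp [pvMergeRow, pvMergeWalk, pvPad4, PySem.List.pyGetD, PySem.List.pyGet?,
          PySem.List.pyIdx?, PySem.List.pySetD, PySem.List.pySet?, PySem.List.len_eq,
          ha, hb, hd, h2, pvToStr_ne_space, List.filter]
    · by_cases h2 : c = b
      · subst h2
        simp [pvMergeRow, pvMergeWalk, pvPad4, PySem.List.pyGetD, PySem.List.pyGet?,
          PySem.List.pyIdx?, PySem.List.pySetD, PySem.List.pySet?, PySem.List.len_eq,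
          ha, hc, hd, h1, pvToStr_ne_space, List.filter]
      · by_cases h3 : b = a
        · subst h3
          simp [pvMergeRow, pvMergeWalk, pvPad4, PySem.List.pyGetD, PySem.List.pyGet?,
            PySem.List.pyIdx?, PySem.List.pySetD, PySem.List.pySet?, PySem.List.len_eq,
            ha, hb, hc, hd, h1, h2, pvToStr_ne_space, List.filter]
        · simp [pvMergeRow, pvMergeWalk, pvPad4, PySem.List.pyGetD, PySem.List.pyGet?,
            PySem.List.pyIdx?, PySem.List.pySetD, PySem.List.pySet?, PySem.List.len_eq,
            ha, hb, hc, hd, h1, h2, h3, List.filter]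
  | a :: b :: c :: d :: e :: rest, h4 => simp at h4; omega


theorem doKeyRight_perRow (row : List String) :
    pvMoveRow (pvMergeRow (pvMoveRow row) (-1)) = pvShiftMergeRight row := by
  rw [pvMoveRow_eq row]
  unfold pvShiftMergeRight
  have htiles : PySem.List.slice (row.filter (fun x => x ≠ " ")) (some (-4)) none
      = ((row.filter (fun x => x ≠ " ")).reverse.take 4).reverse := by
    rw [PySem.List.slice_some_none, PySem.List.clampIdx_neg_ofNat _ 4 (by norm_num)]
    rw [List.reverse_take, List.reverse_reverse, List.length_reverse]
  rw [htiles]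
  have h4 : (((row.filter (fun x => x ≠ " ")).reverse.take 4).reverse).length ≤ 4 := by
    simp [List.length_take]
  have hs : ∀ x ∈ ((row.filter (fun x => x ≠ " ")).reverse.take 4).reverse, x ≠ " " := by
    intro x hx
    rw [List.mem_reverse] at hx
    have := List.mem_reverse.mp (List.mem_of_mem_take hx)
    simpa using (List.mem_filter.mp this).2
  exact pvMerge_eq _ h4 hs

theorem foldl_or_any {α : Type} (l : List α) (q : α → Prop) [DecidablePred q] (init : Bool) :
    l.foldl (fun b i => if q i then true else b) init = (init || l.any (fun i => decide (q i))) := by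
  induction l generalizing init with
  | nil => simp
  | cons a l ih =>
    rw [List.foldl_cons]
    by_cases h : q a
    · rw [if_pos h, ih]; simp [h]
    · rw [if_neg h, ih]; simp [h]


theorem doKeyRight_flag (xs ys : List (List String)) (hlen : xs.length = ys.length) :
    (PySem.List.pyRange 0 (PySem.List.len xs) 1).foldl
      (fun b i => if PySem.List.pyGetD xs i [] ≠ PySem.List.pyGetD ys i [] then true else b) false
    = (xs.zip ys).any (fun p => decide (p.1 ≠ p.2)) := by
  rw [foldl_or_any]
  rw [Bool.eq_iff_iff]
  simp only [Bool.false_or, List.any_eq_true, decide_eq_true_eq]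
  constructor
  · rintro ⟨i, hi, hne⟩
    rw [PySem.List.mem_pyRange_one] at hi
    simp only [PySem.List.len_eq] at hi
    obtain ⟨h0, h1⟩ := hi
    have hlt : i.toNat < xs.length := by omega
    refine ⟨(xs[i.toNat], ys[i.toNat]), ?_, ?_⟩
    · have : (xs.zip ys)[i.toNat]'(by simp [List.length_zip]; omega) = (xs[i.toNat], ys[i.toNat]) := by
        simp [List.getElem_zip]
      rw [← this]; exact List.getElem_mem _
    · rw [PySem.List.pyGetD_eq_getElem xs (i := i) [] h0 (by simpa using h1),
         PySem.List.pyGetD_eq_getElem ys (i := i) [] h0 (by omega)] at hne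
      simpa using hne
  · rintro ⟨p, hp, hne⟩
    obtain ⟨k, hk, rfl⟩ := List.mem_iff_getElem.mp hp
    have hkx : k < xs.length := by simp [List.length_zip] at hk; omega
    refine ⟨(k : Int), ?_, ?_⟩
    · rw [PySem.List.mem_pyRange_one]; simp [PySem.List.len_eq]; omega
    · rw [PySem.List.pyGetD_eq_getElem xs (i := (k:Int)) [] (by positivity) (by simpa using hkx),
         PySem.List.pyGetD_eq_getElem ys (i := (k:Int)) [] (by positivity) (by simp; omega)]
      simpa [List.getElem_zip] using hne


-- ===== VERDICT (by name: the statement is the Claim_ definition above) =====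
theorem doKeyRight_spec : Claim_equal_doKeyRight := by
  intro board _ _
  unfold Spec_doKeyRight doKeyRight doKeyRight_alt
  rw [PySem.List.foldl_append_singleton_eq_map]
  simp only [List.map_map, List.nil_append, Function.comp_def]
  rw [List.map_congr_left (fun row (_ : row ∈ board) => doKeyRight_perRow row)]
  rw [doKeyRight_flag _ _ (by simp)]
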